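-- pv_equiv track=rewrite | github.com/ColdHumour/ProjectEuler | combinatorics.py | seqPartitions
-- ===== SOURCE A (Python) =====
-- from itertools import permutations, combinations, combinations_with_replacement
--
-- def seqPartitions(sequence, p):
--     """
--     list all permutations of the sequence satisfying given partition p
--
--     e.g partition(3, 5) == [[1, 1, 3], [1, 2, 2]]
--     """
--
--     if len(sequence) != sum(p):
--         raise ValueError("The length of sequence doesn't match given partition!")
--
--     if len(p) == 1:
--         output = []
--         for subp in combinations(sequence, p[0]):
--             output += [[list(subp)]]
--         return output
--     else:
--         output = []
--         for subp in combinations(sequence, p[0]):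
--             newseq = [ele for ele in sequence if ele not in subp]
--             output += [[list(subp)] + s for s in seqPartitions(newseq, p[1:])]
--         return output
-- ===== SOURCE B (Python) =====
-- from itertools import combinations
--
-- def seqPartitions(sequence, p):
--     """
--     list all permutations of the sequence satisfying given partition p
--     (iterative: one left-to-right pass over p, maintaining a worklist of
--     (remaining sequence, prefix of sublists) states)
--     """
--     if len(sequence) != sum(p):
--         raise ValueError("The length of sequence doesn't match given partition!")
--
--     states = [(sequence, [])]
--     for q in p:
--         states = [([ele for ele in seq if ele not in subp], prefix + [list(subp)])
--                   for seq, prefix in states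
--                   for subp in combinations(seq, q)]
--     return [prefix for _, prefix in states]
-- ===== Notes on version B (the rewrite author's own statement) =====
-- stated objective: alternative
-- what changed: Replaces A's recursion on the partition with a single left-to-right fold over p that maintains a worklist of (remaining-sequence, prefix) states, expanding every state by its combinations at each level; the value-based 'ele not in subp' filter is kept verbatim so duplicate handling and emission order match A's DFS exactly.
import Mathlib
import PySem

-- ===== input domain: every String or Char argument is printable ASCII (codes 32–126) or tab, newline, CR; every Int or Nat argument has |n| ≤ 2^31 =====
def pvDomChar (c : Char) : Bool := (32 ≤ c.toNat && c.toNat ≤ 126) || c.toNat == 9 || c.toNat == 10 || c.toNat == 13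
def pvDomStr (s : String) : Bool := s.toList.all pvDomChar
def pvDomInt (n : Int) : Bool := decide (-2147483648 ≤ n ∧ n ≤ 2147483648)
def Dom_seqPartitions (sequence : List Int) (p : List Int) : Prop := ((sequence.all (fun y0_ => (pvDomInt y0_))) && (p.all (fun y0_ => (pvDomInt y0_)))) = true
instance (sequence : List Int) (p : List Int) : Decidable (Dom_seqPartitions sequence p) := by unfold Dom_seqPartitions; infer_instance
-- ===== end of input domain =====

-- B replaces A's recursion on the partition by one left-to-right fold over p with a
-- worklist of (remaining sequence, prefix) states; same cost, different decomposition.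


-- ===== PORT A =====
-- itertools.combinations over a list, exact enumeration order (shared by both ports,
-- as both Pythons call the library function)
def pyCombos (xs : List Int) (r : Nat) : List (List Int) :=
  match r, xs with
  | 0, _ => [[]]
  | _ + 1, [] => []
  | r + 1, x :: rest => (pyCombos rest r).map (fun t => x :: t) ++ pyCombos rest (r + 1)

-- recursion of A on p; the inputs on which A raises (the `len != sum` ValueError at some
-- reached call, p[0] IndexError on empty p, negative r in a reached combinations call)
-- are excluded by Pre_, so p[0] is read with .toNat and the [] case returns [].
def spA : List Int → List Int → List (List (List Int))
  | _, [] => []                                   -- p[0] IndexError, outside Pre_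
  | seq, q :: rest =>
    if rest.isEmpty then                          -- len(p) == 1 branch
      (pyCombos seq q.toNat).map (fun subp => [subp])
    else
      (pyCombos seq q.toNat).flatMap (fun subp =>
        (spA (seq.filter (fun e => !(subp.contains e))) rest).map (fun s => subp :: s))

def seqPartitions (sequence : List Int) (p : List Int) : List (List (List Int)) :=
  spA sequence p

-- ===== PORT B =====
-- one level of B's worklist expansion: every state spawns one child per combination
def spBStep (states : List (List Int × List (List Int))) (q : Int) : List (List Int × List (List Int)) :=
  states.flatMap (fun st =>
    (pyCombos st.1 q.toNat).map (fun subp =>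
      (st.1.filter (fun e => !(subp.contains e)), st.2 ++ [subp])))

def seqPartitions_alt (sequence : List Int) (p : List Int) : List (List (List Int)) :=
  (p.foldl spBStep [(sequence, [])]).map Prod.snd

-- ===== PRECONDITION & SPEC =====
-- One linear scan over p deciding whether the Python A returns normally: tracking only the
-- remaining length L and whether the remaining sequence still holds duplicates (d), a level
-- raises if its part is negative, returns [] early if the part exceeds L (empty combinations),
-- and raises on a duplicate-holding sequence whenever 1 ≤ part ≤ L-1 (some combination then
-- splits a duplicate class and the next recursive call fails its length check).
def preScanPre : Int → Bool → List Int → Bool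
  | _, _, [] => true
  | _, _, [r] => decide (0 ≤ r)
  | L, d, r :: r2 :: rest =>
    if r < 0 then false
    else if L < r then true
    else if d && decide (1 ≤ r) && decide (r < L) then false
    else preScanPre (if r == L then 0 else L - r) (if r == L then false else d) (r2 :: rest)

-- Pre_ = exactly the inputs on which the Python A returns normally (no exception):
-- the top-level length/sum check passes, p is nonempty, and no reached level raises.
def Pre_seqPartitions (sequence : List Int) (p : List Int) : Prop :=
  (sequence.length : Int) = p.sum ∧ p ≠ [] ∧
    preScanPre (sequence.length : Int) (decide (¬ sequence.Nodup)) p = true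
instance (sequence : List Int) (p : List Int) : Decidable (Pre_seqPartitions sequence p) := by
  unfold Pre_seqPartitions; infer_instance

def pvWitness_seqPartitions : List Int × List Int := ([1, 2, 3], [1, 2])

def Spec_seqPartitions (sequence : List Int) (p : List Int) (out : List (List (List Int))) : Prop := out = seqPartitions_alt sequence p
instance (sequence : List Int) (p : List Int) (out : List (List (List Int))) : Decidable (Spec_seqPartitions sequence p out) := by unfold Spec_seqPartitions; infer_instance

-- ===== CLAIM (what is proved, stated in full; the proofs are below) =====
def Claim_equal_seqPartitions : Prop := ∀ (sequence : List Int) (p : List Int), Dom_seqPartitions sequence p → Pre_seqPartitions sequence p → Spec_seqPartitions sequence p (seqPartitions sequence p)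

-- ===== LEMMAS AND PROOFS =====

-- B's fold, projected to the prefixes, is A's recursion run from every state.
lemma spB_fold_eq_spA (p : List Int) : p ≠ [] →
    ∀ (states : List (List Int × List (List Int))),
      (p.foldl spBStep states).map Prod.snd =
        states.flatMap (fun st => (spA st.1 p).map (fun part => st.2 ++ part)) := by
  induction p with
  | nil => intro h; exact absurd rfl h
  | cons q rest ih =>
    intro _ states
    cases rest with
    | nil =>
      simp [spBStep, spA, List.map_flatMap, List.map_map, Function.comp_def]
    | cons q' rest' =>
      have hne : (q' :: rest') ≠ ([] : List Int) := by simp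
      calc ((q :: q' :: rest').foldl spBStep states).map Prod.snd
          = ((q' :: rest').foldl spBStep (spBStep states q)).map Prod.snd := rfl
        _ = (spBStep states q).flatMap
              (fun st => (spA st.1 (q' :: rest')).map (fun part => st.2 ++ part)) :=
            ih hne (spBStep states q)
        _ = states.flatMap (fun st => (spA st.1 (q :: q' :: rest')).map (fun part => st.2 ++ part)) := by
            simp [spBStep, spA, List.flatMap_assoc, List.map_flatMap, List.flatMap_map,
                  List.map_map, Function.comp_def, List.filter_filter, List.append_assoc]

theorem seqPartitions_spec : Claim_equal_seqPartitions := by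
  intro sequence p _ hpre
  unfold Spec_seqPartitions seqPartitions seqPartitions_alt
  rw [spB_fold_eq_spA p hpre.2.1 [(sequence, [])]]
  simp
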